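-- pv_equiv track=rewrite | github.com/miliar/Code_Jam_Webscraper | Solutions_python/Problem_155/1177.py | solve
-- ===== SOURCE A (Python) =====
-- def solve(smax, numbers):
-- #    print "solving {}".format(numbers)
--     req = 0
--     clapping = 0
--     for i, count in enumerate(numbers):
-- #        print "req {} clapping {}".format(req, clapping)
-- #        print "processing {} {}".format(i, count)
--         count = int(count)
--         if count == 0:
--             continue
--         if clapping >= i:
--             clapping += count
--         else:
--             req += i - clapping
--             clapping = i + count
-- #    print "final req {}".format(req)
--     return req
-- ===== SOURCE B (Python) =====
-- def solve(smax, numbers):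
--     counts = [int(c) for c in numbers]
--     prefix = [0]
--     for c in counts:
--         prefix.append(prefix[-1] + c)
--     deficits = [i - p for (i, c), p in zip(enumerate(counts), prefix) if c != 0]
--     return max([0] + deficits)
-- ===== Notes on version B (the rewrite author's own statement) =====
-- stated objective: alternative
-- what changed: Replaces A's one-pass greedy clapping counter with reset logic by a staged computation: an explicit prefix-sum list, a deficit list i - prefix[i] over nonzero positions, and a final max with 0.
import Mathlib
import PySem

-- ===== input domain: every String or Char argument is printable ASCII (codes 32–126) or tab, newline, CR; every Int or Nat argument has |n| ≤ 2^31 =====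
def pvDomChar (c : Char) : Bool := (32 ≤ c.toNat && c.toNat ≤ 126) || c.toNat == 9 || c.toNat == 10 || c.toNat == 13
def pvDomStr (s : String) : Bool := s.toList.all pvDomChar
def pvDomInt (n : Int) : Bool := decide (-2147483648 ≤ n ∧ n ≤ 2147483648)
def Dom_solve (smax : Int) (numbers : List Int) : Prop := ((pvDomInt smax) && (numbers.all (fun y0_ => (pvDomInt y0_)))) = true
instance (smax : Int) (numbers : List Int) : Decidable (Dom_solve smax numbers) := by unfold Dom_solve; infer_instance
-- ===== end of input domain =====

-- B replaces A's one-pass greedy clapping counter (with its if/else reset) by a staged computation: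
-- an explicit prefix-sum list, a deficit list i - prefix[i] over nonzero positions, then max with 0.
-- Same O(n) cost; a different decomposition, not a speed claim.

-- ===== PORT A =====
-- state: (req, clapping)
def solveStepA (s : Int × Int) (p : Int × Int) : Int × Int :=
  let i := p.1
  let count := p.2
  if count = 0 then s
  else if s.2 ≥ i then (s.1, s.2 + count)
  else (s.1 + (i - s.2), i + count)

def solve (smax : Int) (numbers : List Int) : Int :=
  ((PySem.List.enumerate numbers).foldl solveStepA (0, 0)).1

-- ===== PORT B =====
def solve_alt (smax : Int) (numbers : List Int) : Int :=
  let counts := numbers.map (fun c => c)   -- int(c) is the identity on ints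
  -- prefix[-1]: the list always holds at least [0], so the IndexError branch (none) is unreachable
  let prefixL := counts.foldl (fun acc c => acc ++ [((PySem.List.pyGet? acc (-1)).getD 0) + c]) [(0 : Int)]
  let deficits := (((PySem.List.enumerate counts).zip prefixL).filter
      (fun q => decide (q.1.2 ≠ 0))).map (fun q => q.1.1 - q.2)
  (PySem.List.max? ((0 : Int) :: deficits) (fun y => y)).getD 0   -- max([0] + deficits); list nonempty

-- ===== PRECONDITION & SPEC =====
def Spec_solve (smax : Int) (numbers : List Int) (out : Int) : Prop := out = solve_alt smax numbers
instance (smax : Int) (numbers : List Int) (out : Int) : Decidable (Spec_solve smax numbers out) := by unfold Spec_solve; infer_instance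

-- ===== CLAIM (what is proved, stated in full; the proofs are below) =====
def Claim_equal_solve : Prop := ∀ (smax : Int) (numbers : List Int), Dom_solve smax numbers → Spec_solve smax numbers (solve smax numbers)

-- ===== LEMMAS AND PROOFS =====

-- Proof-only intermediate: B's running-maximum one-pass form; state (req, total).
def solveStepB (s : Int × Int) (p : Int × Int) : Int × Int :=
  let i := p.1
  let count := p.2
  let req := if count ≠ 0 then (if i - s.2 > s.1 then i - s.2 else s.1) else s.1
  (req, s.2 + count)

-- Proof-only: structural prefix-sum list (pfx t cs = t :: running sums).
def pfx (t : Int) : List Int → List Int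
  | [] => [t]
  | c :: cs => t :: pfx (t + c) cs

-- Proof-only: enumerate from an arbitrary start, structurally.
def enumFrom (k : Int) : List Int → List (Int × Int)
  | [] => []
  | c :: cs => (k, c) :: enumFrom (k + 1) cs

theorem enumerate_eq_enumFrom (xs : List Int) (k : Int) :
    PySem.List.enumerate xs k = enumFrom k xs := by
  induction xs generalizing k with
  | nil => simp [PySem.List.enumerate_nil, enumFrom]
  | cons c cs ih => simp [PySem.List.enumerate_cons, enumFrom, ih]

-- A's fold equals the running-max fold: A's clapping = B's total + the shared req.
theorem solve_fold_inv (l : List (Int × Int)) (req total : Int) :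
    (l.foldl solveStepA (req, total + req)).1 = (l.foldl solveStepB (req, total)).1 := by
  induction l generalizing req total with
  | nil => rfl
  | cons p l ih =>
    obtain ⟨i, c⟩ := p
    simp only [List.foldl_cons, solveStepA, solveStepB]
    by_cases hc : c = 0
    · simp only [hc, ne_eq, not_true_eq_false, if_false]
      have := ih req total
      simpa using this
    · simp only [ne_eq, hc, not_false_eq_true, if_true]
      by_cases hge : total + req ≥ i
      · have hmax : ¬ (i - total > req) := by omega
        simp only [if_pos hge, if_neg hmax]
        calc (l.foldl solveStepA (req, total + req + c)).1
            = (l.foldl solveStepA (req, (total + c) + req)).1 := by ring_nf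
          _ = (l.foldl solveStepB (req, total + c)).1 := ih req (total + c)
      · have hmax : i - total > req := by omega
        simp only [if_neg hge, if_pos hmax]
        calc (l.foldl solveStepA (req + (i - (total + req)), i + c)).1
            = (l.foldl solveStepA (i - total, (total + c) + (i - total))).1 := by ring_nf
          _ = (l.foldl solveStepB (i - total, total + c)).1 := ih (i - total) (total + c)

-- B's staged prefix fold builds exactly pfx.
theorem prefix_fold_eq (counts : List Int) (pre : List Int) (t : Int) :
    counts.foldl (fun acc c => acc ++ [((PySem.List.pyGet? acc (-1)).getD 0) + c]) (pre ++ [t])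
      = pre ++ pfx t counts := by
  induction counts generalizing pre t with
  | nil => simp [pfx]
  | cons c cs ih =>
    have hstep : ((pre ++ [t]) ++ [((PySem.List.pyGet? (pre ++ [t]) (-1)).getD 0) + c])
        = (pre ++ [t]) ++ [t + c] := by
      simp [PySem.List.pyGet?_neg_one]
    rw [List.foldl_cons]
    show List.foldl _ ((pre ++ [t]) ++ [((PySem.List.pyGet? (pre ++ [t]) (-1)).getD 0) + c]) cs = _
    rw [hstep, ih (pre ++ [t]) (t + c)]
    simp [pfx, List.append_assoc]

-- The running-max fold equals foldl max over the staged deficit list.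
theorem deficit_max_eq (counts : List Int) (k t r : Int) :
    ((((enumFrom k counts).zip (pfx t counts)).filter (fun q => decide (q.1.2 ≠ 0))).map
        (fun q => q.1.1 - q.2)).foldl max r
      = ((enumFrom k counts).foldl solveStepB (r, t)).1 := by
  induction counts generalizing k t r with
  | nil => simp [enumFrom, pfx]
  | cons c cs ih =>
    simp only [enumFrom, pfx, List.zip_cons_cons, List.foldl_cons, solveStepB]
    rw [List.filter_cons]
    by_cases hc : c = 0
    · rw [if_neg (by simp [hc]), if_neg (not_not_intro hc)]
      exact ih (k + 1) (t + c) r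
    · rw [if_pos (by simpa using hc), if_pos hc, List.map_cons, List.foldl_cons]
      have hmax : max r (k - t) = if k - t > r then k - t else r := by
        rcases le_or_gt (k - t) r with h | h
        · rw [max_eq_left h, if_neg (by omega)]
        · rw [max_eq_right h.le, if_pos h]
      show List.foldl max (max r (k - t)) _ = _
      rw [hmax]
      exact ih (k + 1) (t + c) _

-- ===== VERDICT (by name: the statement is the Claim_ definition above) =====
theorem solve_spec : Claim_equal_solve := by
  intro smax numbers _
  unfold Spec_solve solve solve_alt
  simp only [List.map_id']
  rw [show ([(0:Int)] : List Int) = ([] : List Int) ++ [(0:Int)] from rfl, prefix_fold_eq,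
    List.nil_append, enumerate_eq_enumFrom, PySem.List.max?_id_cons, Option.getD_some,
    deficit_max_eq]
  have h := solve_fold_inv (PySem.List.enumerate numbers) 0 0
  rw [enumerate_eq_enumFrom] at h
  simpa using h
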